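-- pv_equiv track=rewrite | github.com/jmyrberg/finnlem | src/model_processing.py | _smart_lower
-- ===== SOURCE A (Python) =====
-- def _smart_lower(doc):
--     previous_token = '.'
--     new_doc = []
--     for token in doc:
--         if previous_token == '.':
--             token = token.lower()
--         new_doc.append(token)
--         previous_token = token
--     return(new_doc)
-- ===== SOURCE B (Python) =====
-- def _smart_lower(doc):
--     # Skip-ahead traversal: lower the token at i (it follows a period), then
--     # jump directly to the next '.' and copy the untouched span in one slice.
--     doc = list(doc)
--     out = []
--     i = 0
--     while i < len(doc):
--         out.append(doc[i].lower())
--         try: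
--             j = doc.index('.', i)
--         except ValueError:
--             out.extend(doc[i + 1:])
--             break
--         out.extend(doc[i + 1:j + 1])
--         i = j + 1
--     return out
-- ===== Notes on version B (the rewrite author's own statement) =====
-- stated objective: alternative
-- what changed: Replaces A's token-by-token loop threading a mutable previous_token through every iteration by a skip-ahead traversal: lower the token at the cursor, jump straight to the next '.' via list.index, and copy the untouched span between them with one slice extend.
import Mathlib
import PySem

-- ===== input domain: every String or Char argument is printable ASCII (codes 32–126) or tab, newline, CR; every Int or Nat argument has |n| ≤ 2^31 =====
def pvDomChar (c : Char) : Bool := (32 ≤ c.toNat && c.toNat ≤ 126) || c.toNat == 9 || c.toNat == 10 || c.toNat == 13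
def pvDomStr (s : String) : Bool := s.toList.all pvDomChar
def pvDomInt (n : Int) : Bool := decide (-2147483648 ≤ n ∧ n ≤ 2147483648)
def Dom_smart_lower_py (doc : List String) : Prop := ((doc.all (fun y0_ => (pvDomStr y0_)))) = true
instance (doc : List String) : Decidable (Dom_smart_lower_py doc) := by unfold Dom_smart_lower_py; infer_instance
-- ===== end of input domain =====

-- B replaces A's token-by-token loop with a mutable previous_token by a skip-ahead
-- traversal: lower the token at the cursor, jump to the next '.' with list.index,
-- and copy the untouched span between them as one slice (alternative decomposition).

-- ===== PORT A =====
-- A threads (previous_token, new_doc) through the loop; previous_token becomes the (possibly lowered) token.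
def smart_lower_py (doc : List String) : List String :=
  (doc.foldl
    (fun (st : String × List String) token =>
      let token := if st.1 == "." then PySem.Str.lower token else token
      (token, st.2 ++ [token]))
    (".", [])).2

-- ===== PORT B =====
-- The while loop of Source B: cursor i, output accumulator out.
-- Python's doc.index('.', i) (index with a start argument) is ported as
-- PySem.List.index? on doc.drop i, offset by i; none = the ValueError branch.
def smartLowerAltLoop (doc : List String) (i : Nat) (out : List String) : List String :=
  if h : i < doc.length then
    let out := out ++ [PySem.Str.lower doc[i]]
    match PySem.List.index? (doc.drop i) "." with
    | none => out ++ PySem.List.slice doc (some ((i : Int) + 1)) none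
    | some k =>
      let j := i + k
      smartLowerAltLoop doc (j + 1) (out ++ PySem.List.slice doc (some ((i : Int) + 1)) (some ((j : Int) + 1)))
  else out
termination_by doc.length - i
decreasing_by omega

def smart_lower_py_alt (doc : List String) : List String :=
  smartLowerAltLoop doc 0 []

-- ===== PRECONDITION & SPEC =====
def Spec_smart_lower_py (doc : List String) (out : List String) : Prop := out = smart_lower_py_alt doc
instance (doc : List String) (out : List String) : Decidable (Spec_smart_lower_py doc out) := by unfold Spec_smart_lower_py; infer_instance

-- ===== CLAIM (what is proved, stated in full; the proofs are below) =====
def Claim_equal_smart_lower_py : Prop := ∀ (doc : List String), Dom_smart_lower_py doc → Spec_smart_lower_py doc (smart_lower_py doc)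

-- ===== LEMMAS AND PROOFS =====

-- reference function: specF low l = the smart-lowered l, where low says whether the
-- (virtual) predecessor of l's head was '.'
def specF (low : Bool) : List String → List String
  | [] => []
  | t :: rest =>
    let t' := if low then PySem.Str.lower t else t
    t' :: specF (t' == ".") rest

-- lowerChar only moves uppercase letters, so nothing other than '.' lowers to '.'
theorem lowerChar_eq_dot {c : Char} (h : PySem.Chars.lowerChar c = '.') : c = '.' := by
  unfold PySem.Chars.lowerChar at h
  split at h
  · rename_i hup
    unfold PySem.Chars.isupper at hup
    simp only [Bool.and_eq_true, decide_eq_true_eq] at hup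
    exfalso
    have h1 : (65 : Nat) ≤ c.toNat := hup.1
    have h2 : c.toNat ≤ 90 := hup.2
    have hlt : c.toNat + 32 < 0xd800 := by omega
    have hval : (Char.ofNat (c.toNat + 32)).toNat = c.toNat + 32 := by
      simp [Char.ofNat, Nat.isValidChar, hlt]
    have h46 : (Char.ofNat (c.toNat + 32)).toNat = 46 := by rw [h]; rfl
    omega
  · exact h

theorem lower_ne_dot (t : String) (h : t ≠ ".") : PySem.Str.lower t ≠ "." := by
  intro hl
  apply h
  have hL : (PySem.Str.lower t).toList = (".").toList := by rw [hl]
  rw [PySem.Str.toList_lower] at hL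
  unfold PySem.Chars.lower at hL
  have hdot : (".").toList = ['.'] := by decide
  rw [hdot] at hL
  cases hm : t.toList with
  | nil => rw [hm] at hL; simp at hL
  | cons c cs =>
    cases cs with
    | nil =>
      rw [hm] at hL
      simp at hL
      have hc : c = '.' := lowerChar_eq_dot hL
      subst hc
      have := congrArg String.ofList hm
      simpa using this
    | cons d ds => rw [hm] at hL; simp at hL

theorem lower_beq_dot (t : String) : (PySem.Str.lower t == ".") = (t == ".") := by
  by_cases h : t = "."
  · subst h; decide
  · simp [h, lower_ne_dot t h]

theorem specF_true_cons (t : String) (l : List String) :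
    specF true (t :: l) = PySem.Str.lower t :: specF (t == ".") l := by
  simp [specF, lower_beq_dot]

-- A's loop from state (p, acc) equals acc ++ specF (p == '.') doc
theorem loopA_eq (doc : List String) (p : String) (acc : List String) :
    (doc.foldl
      (fun (st : String × List String) token =>
        let token := if st.1 == "." then PySem.Str.lower token else token
        (token, st.2 ++ [token]))
      (p, acc)).2
    = acc ++ specF (p == ".") doc := by
  induction doc generalizing p acc with
  | nil => simp [specF]
  | cons t rest ih =>
    simp only [List.foldl_cons, specF]
    rw [ih]
    simp

theorem specF_false_no_dot (l : List String) (h : "." ∉ l) : specF false l = l := by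
  induction l with
  | nil => rfl
  | cons t rest ih =>
    simp only [List.mem_cons, not_or] at h
    have ht : (t == ".") = false := beq_eq_false_iff_ne.mpr (fun e => h.1 e.symm)
    simp [specF, ht, ih h.2]

theorem specF_false_split (l : List String) (m : Nat)
    (h : PySem.List.index? l "." = some m) :
    specF false l = l.take (m + 1) ++ specF true (l.drop (m + 1)) := by
  induction l generalizing m with
  | nil => simp [PySem.List.index?] at h
  | cons t rest ih =>
    by_cases ht : t = "."
    · subst ht
      rw [PySem.List.index?_cons_self] at h
      cases h
      simp [specF]
    · rw [PySem.List.index?_cons_of_ne rest ht] at h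
      simp only [Option.map_eq_some_iff] at h
      obtain ⟨m', hm', rfl⟩ := h
      have htb : (t == ".") = false := by simp [ht]
      have hgoal : specF false (t :: rest) = t :: specF false rest := by simp [specF, htb]
      rw [hgoal, ih m' hm']
      simp

-- B's loop equals out ++ specF true (doc.drop i)  (fuel induction on length - i)
theorem loopB_eq (doc : List String) (n : Nat) :
    ∀ (i : Nat) (out : List String), doc.length - i ≤ n →
      smartLowerAltLoop doc i out = out ++ specF true (doc.drop i) := by
  induction n with
  | zero =>
    intro i out hle
    have hig : ¬ i < doc.length := by omega
    rw [smartLowerAltLoop, dif_neg hig, List.drop_eq_nil_of_le (by omega)]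
    simp [specF]
  | succ n ih =>
    intro i out hle
    by_cases hi : i < doc.length
    · have hdrop : doc.drop i = doc[i] :: doc.drop (i + 1) :=
        List.drop_eq_getElem_cons hi
      rw [smartLowerAltLoop, dif_pos hi]
      cases hidx : PySem.List.index? (doc.drop i) "." with
      | none =>
        dsimp only
        have hno : "." ∉ doc.drop i := (PySem.List.index?_eq_none_iff _ _).mp hidx
        rw [hdrop] at hno
        simp only [List.mem_cons, not_or] at hno
        have hti : (doc[i] == ".") = false := by simp [Ne.symm hno.1]
        have hcast : ((i : Int) + 1) = ((i + 1 : Nat) : Int) := by push_cast; ring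
        rw [hcast, PySem.List.slice_from_natCast]
        rw [hdrop, specF_true_cons, hti, specF_false_no_dot _ hno.2]
        simp
      | some k =>
        dsimp only
        have hcast1 : ((i : Int) + 1) = ((i + 1 : Nat) : Int) := by push_cast; ring
        have hcast2 : ((i + k : Nat) : Int) + 1 = ((i + k + 1 : Nat) : Int) := by push_cast; ring
        rw [hcast1, hcast2, PySem.List.slice_natCast]
        rw [ih (i + k + 1) _ (by omega)]
        rw [hdrop] at hidx
        by_cases hd : doc[i] = "."
        · -- k = 0: the cursor token itself is the period
          rw [hd, PySem.List.index?_cons_self] at hidx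
          cases hidx
          rw [hdrop, specF_true_cons]
          simp [hd]
        · rw [PySem.List.index?_cons_of_ne _ hd] at hidx
          simp only [Option.map_eq_some_iff] at hidx
          obtain ⟨m', hm', hk⟩ := hidx
          have hti : (doc[i] == ".") = false := beq_eq_false_iff_ne.mpr hd
          rw [hdrop, specF_true_cons, hti, specF_false_split _ m' hm', List.drop_drop]
          have h1 : i + k + 1 - (i + 1) = m' + 1 := by omega
          have h2 : i + 1 + (m' + 1) = i + k + 1 := by omega
          rw [h1, h2]
          simp
    · rw [smartLowerAltLoop, dif_neg hi, List.drop_eq_nil_of_le (by omega)]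
      simp [specF]

-- ===== VERDICT (by name: the statement is the Claim_ definition above) =====
theorem smart_lower_py_spec : Claim_equal_smart_lower_py := by
  intro doc _
  unfold Spec_smart_lower_py smart_lower_py smart_lower_py_alt
  rw [loopA_eq doc "." []]
  rw [loopB_eq doc doc.length 0 [] (by omega)]
  simp
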